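-- pv_equiv track=rewrite | github.com/MothTheMortal/Scraping-Bot | config.py | fix_sentences
-- ===== SOURCE A (Python) =====
-- def fix_sentences(strings, spacing=" - "):
--     bad = []
--     for index in range(len(strings)):
--         if ":" in strings[index] and index != 0:
--             strings[index - 1] += spacing + strings[index]
--             bad.append(index)
--     for index in bad[::-1]:
--         strings.pop(index)
--     return strings
-- ===== SOURCE B (Python) =====
-- def fix_sentences(strings, spacing=" - "):
--     result = []
--     for i, s in enumerate(strings):
--         if ":" in s and i != 0:
--             continue
--         if i + 1 < len(strings) and ":" in strings[i + 1]:
--             s += spacing + strings[i + 1]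
--         result.append(s)
--     strings[:] = result
--     return strings
-- ===== Notes on version B (the rewrite author's own statement) =====
-- stated objective: alternative
-- what changed: Single forward pass that pulls the next colon-containing element onto the current kept element while building a fresh result list, instead of A's two passes (mutate predecessors in place, record bad indices, then pop them in reverse); trades in-place surgery for an output accumulator at similar cost.
import Mathlib
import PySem

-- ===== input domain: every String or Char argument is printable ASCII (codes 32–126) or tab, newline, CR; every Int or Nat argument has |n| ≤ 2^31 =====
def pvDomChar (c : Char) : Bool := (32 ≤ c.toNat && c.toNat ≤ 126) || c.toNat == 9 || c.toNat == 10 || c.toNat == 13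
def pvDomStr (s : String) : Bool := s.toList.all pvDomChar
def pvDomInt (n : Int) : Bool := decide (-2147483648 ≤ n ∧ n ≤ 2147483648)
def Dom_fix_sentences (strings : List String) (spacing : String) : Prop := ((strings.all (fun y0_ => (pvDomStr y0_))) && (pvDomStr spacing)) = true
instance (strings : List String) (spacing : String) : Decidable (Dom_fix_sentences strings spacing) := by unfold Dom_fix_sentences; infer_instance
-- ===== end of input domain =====

-- B merges each colon element forward onto its predecessor in one pass over a fresh result list,
-- instead of A's in-place mutation plus reverse pops; equivalence is about the RETURN value
-- (both Pythons also mutate `strings` to that same value).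

-- ===== PORT A =====
def fix_sentences (strings : List String) (spacing : String) : List String :=
  -- first loop: build `bad` and mutate predecessors in place
  let st :=
    (PySem.List.pyRange 0 (strings.length : Int) 1).foldl
      (fun (s : List String × List Int) index =>
        if PySem.Str.isIn ":" (PySem.List.pyGetD s.1 index "") && (index != 0) then
          -- strings[index-1] += spacing + strings[index]  (index ≥ 1 here, so .toNat is exact)
          (s.1.set (index - 1).toNat
             (PySem.List.pyGetD s.1 (index - 1) "" ++ (spacing ++ PySem.List.pyGetD s.1 index "")),
           s.2 ++ [index])
        else s)
      (strings, ([] : List Int))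
  -- for index in bad[::-1]: strings.pop(index)   (bad[::-1] is .reverse, PySem.List.slice?_none_none_neg_one;
  -- every recorded index is in range, so pop? always succeeds; the `none` arm is unreachable)
  st.2.reverse.foldl
    (fun l index =>
      match PySem.List.pop? l index with
      | some r => r.2
      | none => l)
    st.1

-- ===== PORT B =====
def fix_sentences_alt (strings : List String) (spacing : String) : List String :=
  (PySem.List.enumerate strings 0).foldl
    (fun (result : List String) p =>
      if PySem.Str.isIn ":" p.2 && (p.1 != 0) then result   -- continue
      else
        let s :=
          if decide (p.1 + 1 < (strings.length : Int)) &&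
             PySem.Str.isIn ":" (PySem.List.pyGetD strings (p.1 + 1) "") then
            p.2 ++ (spacing ++ PySem.List.pyGetD strings (p.1 + 1) "")
          else p.2
        result ++ [s])
    []

-- ===== PRECONDITION & SPEC =====
def Spec_fix_sentences (strings : List String) (spacing : String) (out : List String) : Prop := out = fix_sentences_alt strings spacing
instance (strings : List String) (spacing : String) (out : List String) : Decidable (Spec_fix_sentences strings spacing out) := by unfold Spec_fix_sentences; infer_instance

-- ===== CLAIM (what is proved, stated in full; the proofs are below) =====
def Claim_equal_fix_sentences : Prop := ∀ (strings : List String) (spacing : String), Dom_fix_sentences strings spacing → Spec_fix_sentences strings spacing (fix_sentences strings spacing)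

-- ===== LEMMAS AND PROOFS =====

-- predicate: element j contains ':' (Nat-indexed, on the ORIGINAL list)
def pvC (strings : List String) (j : Nat) : Bool :=
  PySem.Str.isIn ":" (strings.getD j "")

-- "bad" element at index j (j ≠ 0 and contains ':')
def pvQ (strings : List String) (j : Nat) : Bool :=
  pvC strings j && (j != 0)

-- state of element j after the first `k` steps of A's first loop
def pvF (strings : List String) (spacing : String) (k j : Nat) : String :=
  if decide (j + 1 < k) && pvC strings (j + 1) then
    strings.getD j "" ++ (spacing ++ strings.getD (j + 1) "")
  else strings.getD j ""


-- element j after first k steps is getD j when j+1 is not yet merged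
theorem pvF_zero_eq (strings : List String) (spacing : String) :
    pvF strings spacing 0 = (fun j => strings.getD j "") := by
  funext j; simp [pvF]

theorem pv_map_getD_range (xs : List String) :
    (List.range xs.length).map (fun j => xs.getD j "") = xs := by
  apply List.ext_getElem
  · simp
  · intro i h1 h2
    simp [List.getD_eq_getElem?_getD, List.getElem?_eq_getElem h2]

theorem pvF_self (strings : List String) (spacing : String) (k : Nat) :
    pvF strings spacing k k = strings.getD k "" := by
  simp [pvF]

theorem pvF_pred (strings : List String) (spacing : String) (k : Nat) (_ : 1 ≤ k) :
    pvF strings spacing k (k - 1) = strings.getD (k - 1) "" := by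
  have h : k - 1 + 1 = k := by omega
  have h2 : decide (k - 1 + 1 < k) = false := by simp [h]
  simp [pvF, h2]

theorem pv_set_eq_map (n : Nat) (f g : Nat → String) (k : Nat) (_ : k < n) (v : String)
    (hv : g k = v) (hother : ∀ j, j ≠ k → f j = g j) :
    ((List.range n).map f).set k v = (List.range n).map g := by
  apply List.ext_getElem
  · simp
  · intro i h1 h2
    simp only [List.length_map, List.length_range] at h2
    rw [List.getElem_set]
    simp only [List.getElem_map, List.getElem_range]
    split
    · next h => subst h; exact hv.symm
    · next h => exact hother i (by omega)

theorem pvF_succ_of_true (strings : List String) (spacing : String) (k j : Nat)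
    (_hc : pvC strings k = true) (_hk : 1 ≤ k) (hj : j ≠ k - 1) :
    pvF strings spacing k j = pvF strings spacing (k + 1) j := by
  have h : (j + 1 < k) ↔ (j + 1 < k + 1) := by omega
  simp only [pvF, decide_eq_decide.mpr h]

theorem pvF_succ_of_false (strings : List String) (spacing : String) (k : Nat)
    (hq : pvQ strings k = false) :
    pvF strings spacing k = pvF strings spacing (k + 1) := by
  funext j
  rcases Bool.and_eq_false_iff.mp hq with hc | hz
  · by_cases hjk : j + 1 = k
    · simp [pvF, hjk, hc]
    · have h : (j + 1 < k) ↔ (j + 1 < k + 1) := by omega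
      simp only [pvF, decide_eq_decide.mpr h]
  · have hk0 : k = 0 := by simpa using hz
    have h : (j + 1 < k) ↔ (j + 1 < k + 1) := by omega
    simp only [pvF, decide_eq_decide.mpr h]

-- invariant of A's first loop: after k steps the list is pvF k pointwise and bad is the q-filter
theorem pv_loop1 (strings : List String) (spacing : String) :
    ∀ (k : Nat), k ≤ strings.length →
    (PySem.List.pyRange 0 (k : Int) 1).foldl
      (fun (s : List String × List Int) index =>
        if PySem.Str.isIn ":" (PySem.List.pyGetD s.1 index "") && (index != 0) then
          (s.1.set (index - 1).toNat
             (PySem.List.pyGetD s.1 (index - 1) "" ++ (spacing ++ PySem.List.pyGetD s.1 index "")),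
           s.2 ++ [index])
        else s)
      (strings, ([] : List Int)) =
    ((List.range strings.length).map (pvF strings spacing k),
     ((List.range k).filter (pvQ strings)).map (fun (i : Nat) => (i : Int))) := by
  intro k
  induction k with
  | zero =>
    intro _
    have : PySem.List.pyRange 0 ((0 : Nat) : Int) 1 = [] := by
      simp
    rw [this]
    simp only [List.foldl_nil, List.range_zero, List.filter_nil, List.map_nil]
    rw [pvF_zero_eq, pv_map_getD_range]
  | succ k ih =>
    intro hk1
    have hk : k < strings.length := by omega
    have hcast : ((k + 1 : Nat) : Int) = (k : Int) + 1 := by push_cast; ring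
    rw [hcast, PySem.List.pyRange_one_succ_right (by positivity), List.foldl_append,
        ih (by omega)]
    simp only [List.foldl_cons, List.foldl_nil]
    rw [PySem.List.pyGetD_natCast, PySem.List.getD_map_range _ _ _ _ hk, pvF_self]
    have hbne : ((k : Int) != 0) = (k != 0) := by
      simp [bne]
    rw [hbne]
    show (if pvQ strings k = true then _ else _) = _
    by_cases hq : pvQ strings k = true
    · have hc : pvC strings k = true := (Bool.and_eq_true_iff.mp hq).1
      have hk0 : 1 ≤ k := by
        have := (Bool.and_eq_true_iff.mp hq).2
        simp [bne] at this; omega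
      rw [if_pos hq]
      have hc1 : (k : Int) - 1 = ((k - 1 : Nat) : Int) := by push_cast [hk0]; ring
      rw [hc1, PySem.List.pyGetD_natCast,
          PySem.List.getD_map_range _ _ _ _ (by omega),
          pvF_pred _ _ _ hk0, Int.toNat_natCast]
      rw [Prod.mk.injEq]
      constructor
      · -- list component
        apply pv_set_eq_map _ _ _ _ (by omega)
        · have h1 : (k - 1) + 1 = k := by omega
          have h2 : decide ((k - 1) + 1 < k + 1) = true := by simp [h1]
          simp [pvF, h1, hc]
        · intro j hj
          exact pvF_succ_of_true strings spacing k j hc hk0 hj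
      · -- bad component
        simp [List.range_succ, List.filter_append, hq]
    · rw [if_neg hq]
      have hqf : pvQ strings k = false := by simpa using hq
      rw [Prod.mk.injEq]
      constructor
      · rw [pvF_succ_of_false strings spacing k hqf]
      · simp [List.range_succ, List.filter_append, hqf]

-- A's second loop: popping the recorded indices in reverse keeps exactly the non-q positions
theorem pv_popLoop (q : Nat → Bool) (g : Nat → String) :
    ∀ (k : Nat) (suffix : List String),
    ((((List.range k).filter q).map (fun (i : Nat) => (i : Int))).reverse).foldl
      (fun l index =>
        match PySem.List.pop? l index with
        | some r => r.2
        | none => l)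
      ((List.range k).map g ++ suffix) =
    ((List.range k).filter (fun j => !q j)).map g ++ suffix := by
  intro k
  induction k with
  | zero => intro suffix; simp
  | succ k ih =>
    intro suffix
    have hsplit : (List.range (k + 1)).map g ++ suffix
        = (List.range k).map g ++ (g k :: suffix) := by
      rw [List.range_succ]; simp
    by_cases hq : q k = true
    · have hfilter : (List.range (k + 1)).filter q = ((List.range k).filter q) ++ [k] := by
        rw [List.range_succ, List.filter_append]; simp [hq]
      have hfilter' : (List.range (k + 1)).filter (fun j => !q j)
          = (List.range k).filter (fun j => !q j) := by
        rw [List.range_succ, List.filter_append]; simp [hq]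
      rw [hsplit, hfilter, hfilter', List.map_append, List.reverse_append]
      simp only [List.map_cons, List.map_nil, List.reverse_cons, List.reverse_nil,
        List.nil_append, List.foldl_append, List.foldl_cons, List.foldl_nil]
      have hlen : k < ((List.range k).map g ++ (g k :: suffix)).length := by simp
      rw [PySem.List.pop?_natCast _ _ hlen]
      have herase : ((List.range k).map g ++ (g k :: suffix)).eraseIdx k
          = (List.range k).map g ++ suffix := by
        rw [List.eraseIdx_append_of_length_le (by simp)]
        simp
      simp only [herase]
      exact ih suffix
    · have hqf : q k = false := by simpa using hq
      have hfilter : (List.range (k + 1)).filter q = (List.range k).filter q := by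
        rw [List.range_succ, List.filter_append]; simp [hqf]
      have hfilter' : (List.range (k + 1)).filter (fun j => !q j)
          = (List.range k).filter (fun j => !q j) ++ [k] := by
        rw [List.range_succ, List.filter_append]; simp [hqf]
      rw [hsplit, hfilter, hfilter', ih (g k :: suffix), List.map_append]
      simp

-- B's fold: skip-or-append is filter-then-map
theorem pv_foldl_skip {α : Type} (p : α → Bool) (f : α → String) :
    ∀ (l : List α) (acc : List String),
    l.foldl (fun acc x => if p x then acc else acc ++ [f x]) acc
      = acc ++ (l.filter (fun x => !p x)).map f := by
  intro l
  induction l with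
  | nil => intro acc; simp
  | cons x xs ih =>
    intro acc
    by_cases hp : p x = true
    · simp [List.foldl_cons, hp, ih]
    · have hpf : p x = false := by simpa using hp
      simp [List.foldl_cons, hpf, ih]

-- B computes the non-q positions of the merged list directly
theorem pv_alt_eq (strings : List String) (spacing : String) :
    fix_sentences_alt strings spacing =
    ((List.range strings.length).filter (fun j => !pvQ strings j)).map
      (pvF strings spacing strings.length) := by
  unfold fix_sentences_alt
  rw [PySem.List.enumerate_eq_map_pyRange strings ""]
  have hlen : PySem.List.len strings = (strings.length : Int) := by
    simp [PySem.List.len]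
  rw [hlen, PySem.List.pyRange_one]
  simp only [zero_add, Int.sub_zero, Int.toNat_natCast, List.map_map, List.foldl_map,
    Function.comp_def]
  rw [pv_foldl_skip
        (fun (k : Nat) => PySem.Str.isIn ":" (PySem.List.pyGetD strings ((k : Int)) "") && (((k : Int)) != 0))
        (fun (k : Nat) =>
          if decide (((k : Int)) + 1 < (strings.length : Int)) &&
             PySem.Str.isIn ":" (PySem.List.pyGetD strings (((k : Int)) + 1) "") then
            PySem.List.pyGetD strings ((k : Int)) "" ++ (spacing ++ PySem.List.pyGetD strings (((k : Int)) + 1) "")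
          else PySem.List.pyGetD strings ((k : Int)) "")]
  rw [List.nil_append]
  have hp : (fun (k : Nat) =>
      !(PySem.Str.isIn ":" (PySem.List.pyGetD strings ((k : Int)) "") && (((k : Int)) != 0)))
      = (fun j => !pvQ strings j) := by
    funext j
    by_cases hj : j = 0 <;> simp [pvQ, pvC, PySem.List.pyGetD_natCast, bne, hj, beq_eq_decide, Int.natCast_eq_zero]
  have hf : (fun (k : Nat) =>
      if decide (((k : Int)) + 1 < (strings.length : Int)) &&
         PySem.Str.isIn ":" (PySem.List.pyGetD strings (((k : Int)) + 1) "") then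
        PySem.List.pyGetD strings ((k : Int)) "" ++ (spacing ++ PySem.List.pyGetD strings (((k : Int)) + 1) "")
      else PySem.List.pyGetD strings ((k : Int)) "")
      = pvF strings spacing strings.length := by
    funext k
    have hc : ((k : Int)) + 1 = ((k + 1 : Nat) : Int) := by push_cast; ring
    have hd : decide (((k : Int)) + 1 < (strings.length : Int)) = decide (k + 1 < strings.length) := by
      rw [decide_eq_decide]; omega
    rw [hd, hc, PySem.List.pyGetD_natCast, PySem.List.pyGetD_natCast]
    simp [pvF, pvC]
  rw [hp, hf]

-- ===== VERDICT (by name: the statement is the Claim_ definition above) =====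
theorem fix_sentences_spec : Claim_equal_fix_sentences := by
  intro strings spacing _
  unfold Spec_fix_sentences fix_sentences
  rw [pv_loop1 strings spacing strings.length le_rfl]
  have := pv_popLoop (pvQ strings) (pvF strings spacing strings.length) strings.length []
  simp only [List.append_nil] at this
  rw [this, pv_alt_eq]
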